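-- pv_equiv track=rewrite | github.com/xJeTq/CS-115 | Lab 6/lab6.py | ternaryToNum
-- ===== SOURCE A (Python) =====
-- def ternaryToNum(s):
--     '''Precondition: s is a string of 0s, 1s, and 2s.
--     Returns the integer corresponding to the ternary representation in s.
--     Note: the empty string represents 0.'''
--     if s == "":
--         return 0
--     elif s[0] == '2':
--         return ((3 ** (len(s))) + ternaryToNum(s[1:])) - (3 ** (len(s) - 1))# Wrong
--     elif s[0] == '1':
--         return (3 ** (len(s) - 1)) + ternaryToNum(s[1:])
--     else:
--         return ternaryToNum(s[1:])
-- ===== SOURCE B (Python) =====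
-- def ternaryToNum(s):
--     '''Precondition: s is a string of 0s, 1s, and 2s.
--     Returns the integer corresponding to the ternary representation in s.
--     Note: the empty string represents 0.'''
--     value = 0
--     for c in s:
--         value = value * 3 + (2 if c == '2' else 1 if c == '1' else 0)
--     return value
-- ===== Notes on version B (the rewrite author's own statement) =====
-- stated objective: faster
-- what changed: Replaces the recursion that repeatedly slices the string and recomputes 3**len with a single left-to-right Horner pass value = value*3 + digit.
import Mathlib
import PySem

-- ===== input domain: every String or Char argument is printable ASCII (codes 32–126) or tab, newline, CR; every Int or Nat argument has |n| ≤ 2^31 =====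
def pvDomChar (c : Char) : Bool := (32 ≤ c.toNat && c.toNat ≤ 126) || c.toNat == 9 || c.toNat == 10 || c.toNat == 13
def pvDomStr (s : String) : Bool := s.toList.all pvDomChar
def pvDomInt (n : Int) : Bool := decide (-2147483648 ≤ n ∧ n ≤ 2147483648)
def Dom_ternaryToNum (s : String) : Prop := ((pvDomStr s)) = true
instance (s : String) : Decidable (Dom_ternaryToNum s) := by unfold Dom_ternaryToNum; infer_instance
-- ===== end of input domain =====

-- B replaces A's slicing recursion (recomputing 3**len at each step) with one Horner pass: faster (asymptotic).


-- ===== PORT A =====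
-- A's recursion on s[1:], over the character list; 3 ** len(s) = (3 : Int) ^ (rest.length + 1)
def ternaryToNumGo : List Char → Int
  | [] => 0
  | c :: rest =>
    if c = '2' then ((3 : Int) ^ (rest.length + 1) + ternaryToNumGo rest) - (3 : Int) ^ rest.length
    else if c = '1' then (3 : Int) ^ rest.length + ternaryToNumGo rest
    else ternaryToNumGo rest

def ternaryToNum (s : String) : Int := ternaryToNumGo s.toList

-- ===== PORT B =====
-- Horner's method: one left-to-right fold, value = value*3 + digit
def ternaryDigit (c : Char) : Int := if c = '2' then 2 else if c = '1' then 1 else 0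

def ternaryToNum_alt (s : String) : Int :=
  s.toList.foldl (fun value c => value * 3 + ternaryDigit c) 0

-- ===== PRECONDITION & SPEC =====
def Spec_ternaryToNum (s : String) (out : Int) : Prop := out = ternaryToNum_alt s
instance (s : String) (out : Int) : Decidable (Spec_ternaryToNum s out) := by unfold Spec_ternaryToNum; infer_instance

-- ===== CLAIM (what is proved, stated in full; the proofs are below) =====
def Claim_equal_ternaryToNum : Prop := ∀ (s : String), Dom_ternaryToNum s → Spec_ternaryToNum s (ternaryToNum s)

-- ===== LEMMAS AND PROOFS =====
theorem ternary_foldl_eq (l : List Char) :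
    ∀ acc : Int, l.foldl (fun value c => value * 3 + ternaryDigit c) acc
      = acc * (3 : Int) ^ l.length + ternaryToNumGo l := by
  induction l with
  | nil => intro acc; simp [ternaryToNumGo]
  | cons c rest ih =>
    intro acc
    simp only [List.foldl_cons, ih, ternaryToNumGo, List.length_cons]
    by_cases h2 : c = '2'
    · simp [h2, ternaryDigit, pow_succ]; ring
    · by_cases h1 : c = '1'
      · simp [h1, ternaryDigit, pow_succ]; ring
      · simp [h1, h2, ternaryDigit, pow_succ]; ring

-- ===== VERDICT (by name: the statement is the Claim_ definition above) =====
theorem ternaryToNum_spec : Claim_equal_ternaryToNum := by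
  intro s _
  unfold Spec_ternaryToNum ternaryToNum ternaryToNum_alt
  simp [ternary_foldl_eq]
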